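-- pv_equiv track=rewrite | github.com/MrBrantCode/unitest_baseline | mut_generate/mist_train_taco/taco_5535/solution.py | min_flips_to_xorgon
-- ===== SOURCE A (Python) =====
-- def min_flips_to_xorgon(n, k, arr):
--     sol = []
--     l = 0
--     u = k
--     while l != u:
--         sol.append(arr[l:min(len(arr), u)])
--         l = min(l + k, len(arr))
--         u = min(u + k, len(arr))
--
--     tiwari = []
--     for i in range(k):
--         titi = 0
--         gao = 0
--         for j in range(len(sol)):
--             if len(sol[j]) > i:
--                 if sol[j][i] == 0:
--                     titi += 1
--                 else:
--                     gao += 1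
--         tiwari.append((titi, gao))
--
--     minflip = (-1, -1)
--     ans = 0
--     ctr = 0
--     for i in tiwari:
--         if i[0] < i[1]:
--             ans += i[0]
--             ctr += 1
--             if i[1] < minflip[0] or minflip[0] == -1:
--                 minflip = (i[1], i[0])
--         else:
--             ans += i[1]
--             if i[0] < minflip[0] or minflip[0] == -1:
--                 minflip = (i[0], i[1])
--
--     if ctr % 2 == 0:
--         ans += minflip[0]
--         ans -= minflip[1]
--
--     return ans
-- ===== SOURCE B (Python) =====
-- def min_flips_to_xorgon(n, k, arr):
--     # One linear pass over arr: position p contributes to column p % k.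
--     zeros = [0] * k
--     ones = [0] * k
--     for p, v in enumerate(arr):
--         c = p % k
--         if v == 0:
--             zeros[c] += 1
--         else:
--             ones[c] += 1
--     minflip = (-1, -1)
--     ans = 0
--     ctr = 0
--     for z, o in zip(zeros, ones):
--         if z < o:
--             ans += z
--             ctr += 1
--             if o < minflip[0] or minflip[0] == -1:
--                 minflip = (o, z)
--         else:
--             ans += o
--             if z < minflip[0] or minflip[0] == -1:
--                 minflip = (z, o)
--     if ctr % 2 == 0:
--         ans += minflip[0]
--         ans -= minflip[1]
--     return ans
-- ===== Notes on version B (the rewrite author's own statement) =====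
-- stated objective: simpler
-- what changed: B never builds the chunk list sol: one linear pass over arr accumulates per-column zero/one counts via p % k into two arrays, replacing A's chunking loop plus k x chunks nested column scan; the parity-minimization loop is kept.
-- outside the precondition, e.g. on min_flips_to_xorgon(0, 0, [1]): A returns 0, B raises ZeroDivisionError
import Mathlib
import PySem

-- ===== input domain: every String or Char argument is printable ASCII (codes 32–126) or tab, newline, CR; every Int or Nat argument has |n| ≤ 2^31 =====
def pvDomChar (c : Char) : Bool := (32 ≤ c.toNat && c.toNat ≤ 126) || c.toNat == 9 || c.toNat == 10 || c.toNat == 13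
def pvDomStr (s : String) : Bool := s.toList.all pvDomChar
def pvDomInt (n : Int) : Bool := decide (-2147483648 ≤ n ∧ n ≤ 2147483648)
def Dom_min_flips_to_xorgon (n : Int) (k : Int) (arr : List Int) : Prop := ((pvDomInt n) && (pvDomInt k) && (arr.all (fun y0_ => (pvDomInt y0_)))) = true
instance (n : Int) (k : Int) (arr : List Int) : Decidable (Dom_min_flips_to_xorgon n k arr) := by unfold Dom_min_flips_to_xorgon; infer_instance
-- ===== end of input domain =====

-- B replaces A's chunk list + nested column scan by one linear pass accumulating
-- per-column counts with p % k (objective: simpler decomposition; same parity loop).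

-- ===== PORT A =====
-- the while loop building sol; fuel (arr.length + 2) is enough for every k ≥ 1,
-- and for k = 0 the condition l = u stops the loop immediately (as in Python)
def pvSolLoop (arr : List Int) (k : Int) : Nat → Int → Int → List (List Int)
  | 0, _, _ => []
  | f + 1, l, u =>
    if l = u then []
    else PySem.List.slice arr (some l) (some (min (arr.length : Int) u)) ::
      pvSolLoop arr k f (min (l + k) (arr.length : Int)) (min (u + k) (arr.length : Int))

-- inner loop of tiwari-building: counts (titi, gao) for column i
-- sol[j][i] is ported as pyGetD _ _ 0, exact under the guard i < len(sol[j]) of the source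
def pvColCount (sol : List (List Int)) (i : Int) : Int × Int :=
  sol.foldl (fun tg sj =>
    if i < (sj.length : Int) then
      if PySem.List.pyGetD sj i 0 = 0 then (tg.1 + 1, tg.2) else (tg.1, tg.2 + 1)
    else tg) (0, 0)

def pvTiwariA (sol : List (List Int)) (k : Int) : List (Int × Int) :=
  (PySem.List.pyRange 0 k 1).map (fun i => pvColCount sol i)

-- the final minflip/ans/ctr loop and the parity fix-up
def pvFinalA (tiwari : List (Int × Int)) : Int :=
  let st := tiwari.foldl (fun (st : (Int × Int) × Int × Int) i =>
    if i.1 < i.2 then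
      ((if i.2 < st.1.1 ∨ st.1.1 = -1 then (i.2, i.1) else st.1), st.2.1 + i.1, st.2.2 + 1)
    else
      ((if i.1 < st.1.1 ∨ st.1.1 = -1 then (i.1, i.2) else st.1), st.2.1 + i.2, st.2.2))
    ((-1, -1), 0, 0)
  if PySem.Int.mod st.2.2 2 = 0 then st.2.1 + st.1.1 - st.1.2 else st.2.1

def min_flips_to_xorgon (n : Int) (k : Int) (arr : List Int) : Int :=
  pvFinalA (pvTiwariA (pvSolLoop arr k (arr.length + 2) 0 k) k)

-- ===== PORT B =====
-- the single pass 'for p, v in enumerate(arr)' carrying the position p;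
-- zeros[c] += 1 is ported as pySetD/pyGetD, exact since 0 ≤ p % k < k = len(zeros) for k ≥ 1
def pvBCount (k : Int) : Int → List Int → List Int × List Int → List Int × List Int
  | _, [], zo => zo
  | p, v :: rest, (zs, os) =>
    let c := PySem.Int.mod p k
    if v = 0 then
      pvBCount k (p + 1) rest (PySem.List.pySetD zs c (PySem.List.pyGetD zs c 0 + 1), os)
    else
      pvBCount k (p + 1) rest (zs, PySem.List.pySetD os c (PySem.List.pyGetD os c 0 + 1))

-- B's parity-minimization loop (kept verbatim from A's source, as Source B does)
def pvFinalB (tiwari : List (Int × Int)) : Int :=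
  let st := tiwari.foldl (fun (st : (Int × Int) × Int × Int) i =>
    if i.1 < i.2 then
      ((if i.2 < st.1.1 ∨ st.1.1 = -1 then (i.2, i.1) else st.1), st.2.1 + i.1, st.2.2 + 1)
    else
      ((if i.1 < st.1.1 ∨ st.1.1 = -1 then (i.1, i.2) else st.1), st.2.1 + i.2, st.2.2))
    ((-1, -1), 0, 0)
  if PySem.Int.mod st.2.2 2 = 0 then st.2.1 + st.1.1 - st.1.2 else st.2.1

def min_flips_to_xorgon_alt (n : Int) (k : Int) (arr : List Int) : Int :=
  let zo := pvBCount k 0 arr (List.replicate k.toNat 0, List.replicate k.toNat 0)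
  pvFinalB (List.zip zo.1 zo.2)

-- ===== PRECONDITION & SPEC =====
-- Pre_ excludes k < 0 (A's while loop never terminates) and k = 0 with nonempty arr
-- (A returns 0 there, but B's p % k raises ZeroDivisionError); k = 0 with empty arr stays in.
def Pre_min_flips_to_xorgon (n : Int) (k : Int) (arr : List Int) : Prop :=
  1 ≤ k ∨ (k = 0 ∧ arr = [])
instance (n : Int) (k : Int) (arr : List Int) : Decidable (Pre_min_flips_to_xorgon n k arr) := by
  unfold Pre_min_flips_to_xorgon; infer_instance

def pvWitness_min_flips_to_xorgon : Int × Int × List Int := (0, 2, [1, 0, 1, 1, 0])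

def Spec_min_flips_to_xorgon (n : Int) (k : Int) (arr : List Int) (out : Int) : Prop := out = min_flips_to_xorgon_alt n k arr
instance (n : Int) (k : Int) (arr : List Int) (out : Int) : Decidable (Spec_min_flips_to_xorgon n k arr out) := by unfold Spec_min_flips_to_xorgon; infer_instance

-- ===== CLAIM (what is proved, stated in full; the proofs are below) =====
def Claim_equal_min_flips_to_xorgon : Prop := ∀ (n : Int) (k : Int) (arr : List Int), Dom_min_flips_to_xorgon n k arr → Pre_min_flips_to_xorgon n k arr → Spec_min_flips_to_xorgon n k arr (min_flips_to_xorgon n k arr)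

-- ===== LEMMAS AND PROOFS =====

-- zero/one counters at column i over positions p, p+1, … (the common spec of both sides)
def pvCnt0 (k i : Int) : Int → List Int → Int
  | _, [] => 0
  | p, v :: rest => (if PySem.Int.mod p k = i ∧ v = 0 then 1 else 0) + pvCnt0 k i (p + 1) rest

def pvCnt1 (k i : Int) : Int → List Int → Int
  | _, [] => 0
  | p, v :: rest => (if PySem.Int.mod p k = i ∧ ¬ v = 0 then 1 else 0) + pvCnt1 k i (p + 1) rest

-- structural form of A's chunking for k = k' + 1
def pvChunks (k' : Nat) : List Int → List (List Int)
  | [] => []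
  | v :: rest => (v :: rest).take (k' + 1) :: pvChunks k' ((v :: rest).drop (k' + 1))
termination_by l => l.length
decreasing_by simp

-- the contribution of one chunk to column i (what A's inner if adds for that chunk)
def pvG (sj : List Int) (i : Int) : Int × Int :=
  if i < (sj.length : Int) then
    if PySem.List.pyGetD sj i 0 = 0 then (1, 0) else (0, 1)
  else (0, 0)

theorem pvColCount_acc (i : Int) (sol : List (List Int)) : ∀ tg : Int × Int,
    sol.foldl (fun tg sj =>
      if i < (sj.length : Int) then
        if PySem.List.pyGetD sj i 0 = 0 then (tg.1 + 1, tg.2) else (tg.1, tg.2 + 1)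
      else tg) tg
    = (tg.1 + ((sol.map fun sj => (pvG sj i).1).sum),
       tg.2 + ((sol.map fun sj => (pvG sj i).2).sum)) := by
  induction sol with
  | nil => intro tg; simp
  | cons sj sol ih =>
    intro tg
    simp only [List.foldl_cons, ih, List.map_cons, List.sum_cons]
    unfold pvG
    split_ifs <;> simp [Prod.ext_iff] <;> omega

theorem pvColCount_eq_sum (sol : List (List Int)) (i : Int) :
    pvColCount sol i
      = ((sol.map fun sj => (pvG sj i).1).sum, (sol.map fun sj => (pvG sj i).2).sum) := by
  unfold pvColCount
  rw [pvColCount_acc]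
  simp

theorem pvColCount_cons (sj : List Int) (sol : List (List Int)) (i : Int) :
    pvColCount (sj :: sol) i
      = ((pvG sj i).1 + (pvColCount sol i).1, (pvG sj i).2 + (pvColCount sol i).2) := by
  simp [pvColCount_eq_sum]

theorem pvCnt_shift (k i : Int) (hk : 1 ≤ k) : ∀ (xs : List Int) (p : Int),
    pvCnt0 k i (p + k) xs = pvCnt0 k i p xs ∧ pvCnt1 k i (p + k) xs = pvCnt1 k i p xs := by
  intro xs
  induction xs with
  | nil => intro p; exact ⟨rfl, rfl⟩
  | cons v rest ih =>
    intro p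
    have hmod : PySem.Int.mod (p + k) k = PySem.Int.mod p k := by
      rw [PySem.Int.mod_eq_emod_of_pos (by omega), PySem.Int.mod_eq_emod_of_pos (by omega)]
      simp
    have ih' := ih (p + 1)
    have harr : p + k + 1 = p + 1 + k := by ring
    simp [pvCnt0, pvCnt1, hmod, harr, ih'.1, ih'.2]

theorem pvCnt_append (k i : Int) : ∀ (xs ys : List Int) (p : Int),
    pvCnt0 k i p (xs ++ ys) = pvCnt0 k i p xs + pvCnt0 k i (p + xs.length) ys ∧
    pvCnt1 k i p (xs ++ ys) = pvCnt1 k i p xs + pvCnt1 k i (p + xs.length) ys := by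
  intro xs
  induction xs with
  | nil => intro ys p; simp [pvCnt0, pvCnt1]
  | cons v rest ih =>
    intro ys p
    have ih' := ih ys (p + 1)
    have harr : p + 1 + (rest.length : Int) = p + ((rest.length : Int) + 1) := by ring
    simp only [List.cons_append, pvCnt0, pvCnt1, ih'.1, ih'.2, List.length_cons]
    push_cast
    rw [← harr]
    constructor <;> ring

theorem pvCnt_small (k i : Int) (hk : 1 ≤ k) : ∀ (xs : List Int) (p : Int), 0 ≤ p →
    p + xs.length ≤ k →
    (pvCnt0 k i p xs, pvCnt1 k i p xs)
      = if p ≤ i ∧ i < p + xs.length then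
          (if PySem.List.pyGetD xs (i - p) 0 = 0 then ((1 : Int), (0 : Int)) else (0, 1))
        else (0, 0) := by
  intro xs
  induction xs with
  | nil =>
    intro p hp hle
    simp only [pvCnt0, pvCnt1, List.length_nil, Nat.cast_zero, add_zero]
    rw [if_neg (by omega)]
  | cons v rest ih =>
    intro p hp hle
    simp only [List.length_cons] at hle
    push_cast at hle
    have hpk : p < k := by omega
    have hmodp : PySem.Int.mod p k = p := by
      rw [PySem.Int.mod_eq_emod_of_pos (by omega)]
      exact Int.emod_eq_of_lt hp hpk
    have ih' := ih (p + 1) (by omega) (by omega)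
    simp only [pvCnt0, pvCnt1, hmodp, List.length_cons]
    by_cases hip : i = p
    · subst hip
      rw [if_neg (show ¬(i + 1 ≤ i ∧ i < i + 1 + (rest.length : Int)) by omega)] at ih'
      rw [Prod.mk.injEq] at ih'
      have hgd : PySem.List.pyGetD (v :: rest) (i - i) 0 = v := by
        rw [sub_self]; exact PySem.List.pyGetD_zero_cons v rest 0
      rw [ih'.1, ih'.2, hgd,
        if_pos (show i ≤ i ∧ i < i + ((rest.length + 1 : Nat) : Int) by push_cast; omega)]
      split_ifs <;> simp_all
    · have hterm0 : ¬(p = i ∧ v = 0) := fun h => hip h.1.symm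
      have hterm1 : ¬(p = i ∧ ¬v = 0) := fun h => hip h.1.symm
      simp only [if_neg hterm0, if_neg hterm1, zero_add]
      by_cases hc : p + 1 ≤ i ∧ i < p + 1 + (rest.length : Int)
      · rw [if_pos hc] at ih'
        rw [if_pos (show p ≤ i ∧ i < p + ((rest.length + 1 : Nat) : Int) by push_cast; omega)]
        have e1 : PySem.List.pyGetD (v :: rest) (i - p) 0
            = PySem.List.pyGetD rest (i - (p + 1)) 0 := by
          rw [PySem.List.pyGetD_eq_getElem (i := i - p) (v :: rest) 0 (by omega)
                (by simp only [List.length_cons]; push_cast; omega),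
              PySem.List.pyGetD_eq_getElem (i := i - (p + 1)) rest 0 (by omega)
                (by omega)]
          have h1 : (i - p).toNat = (i - (p + 1)).toNat + 1 := by omega
          simp [h1]
        rw [e1]
        exact ih'
      · rw [if_neg hc] at ih'
        rw [if_neg (show ¬(p ≤ i ∧ i < p + ((rest.length + 1 : Nat) : Int)) by push_cast; omega)]
        exact ih'

theorem pvG_eq_cnt (k i : Int) (hk : 1 ≤ k) (hi : 0 ≤ i) (xs : List Int)
    (hlen : (xs.length : Int) ≤ k) : pvG xs i = (pvCnt0 k i 0 xs, pvCnt1 k i 0 xs) := by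
  have h := pvCnt_small k i hk xs 0 (le_refl 0) (by omega)
  simp only [sub_zero, zero_add] at h
  unfold pvG
  by_cases hil : i < (xs.length : Int)
  · rw [if_pos ⟨hi, hil⟩] at h
    rw [if_pos hil]
    exact h.symm
  · rw [if_neg (by omega)] at h
    rw [if_neg hil]
    exact h.symm

theorem pvCnt_chunk (k i : Int) (hk : 1 ≤ k) (arr : List Int) :
    pvCnt0 k i 0 arr = pvCnt0 k i 0 (arr.take k.toNat) + pvCnt0 k i 0 (arr.drop k.toNat) ∧
    pvCnt1 k i 0 arr = pvCnt1 k i 0 (arr.take k.toNat) + pvCnt1 k i 0 (arr.drop k.toNat) := by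
  have happ := pvCnt_append k i (arr.take k.toNat) (arr.drop k.toNat) 0
  rw [List.take_append_drop] at happ
  by_cases hkl : k.toNat ≤ arr.length
  · have hlen : (0 : Int) + ((arr.take k.toNat).length : Int) = 0 + k := by
      simp [List.length_take]; omega
    have hshift := pvCnt_shift k i hk (arr.drop k.toNat) 0
    rw [hlen] at happ
    rw [happ.1, happ.2, hshift.1, hshift.2]
    exact ⟨rfl, rfl⟩
  · rw [List.drop_eq_nil_of_le (by omega), List.take_of_length_le (by omega)]
    simp [pvCnt0, pvCnt1]

theorem pvColCount_chunks (k i : Int) (hk : 1 ≤ k) (hi : 0 ≤ i) :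
    ∀ (arr : List Int), pvColCount (pvChunks (k.toNat - 1) arr) i
      = (pvCnt0 k i 0 arr, pvCnt1 k i 0 arr) := by
  intro arr
  induction hn : arr.length using Nat.strong_induction_on generalizing arr with
  | _ n ihn =>
  cases arr with
  | nil =>
    rw [pvChunks]
    simp [pvColCount, pvCnt0, pvCnt1]
  | cons v rest =>
    have hk1 : k.toNat - 1 + 1 = k.toNat := by omega
    rw [pvChunks, pvColCount_cons, hk1]
    rw [ihn ((v :: rest).drop k.toNat).length (by subst hn; simp [List.length_drop]; omega) _ rfl]
    rw [pvG_eq_cnt k i hk hi _ (by simp [List.length_take]; omega)]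
    rw [(pvCnt_chunk k i hk (v :: rest)).1, (pvCnt_chunk k i hk (v :: rest)).2]

theorem pvSolLoop_go (k : Int) (hk : 1 ≤ k) (arr : List Int) : ∀ (f : Nat) (l : Nat),
    l ≤ arr.length → arr.length - l + 1 ≤ f →
    pvSolLoop arr k f (l : Int) (min ((l : Int) + k) (arr.length : Int))
      = pvChunks (k.toNat - 1) (arr.drop l) := by
  intro f
  induction f with
  | zero => intro l hl hf; omega
  | succ f ihf =>
    intro l hl hf
    by_cases hle : l = arr.length
    · subst hle
      rw [pvSolLoop,
        show min ((arr.length : Int) + k) (arr.length : Int) = (arr.length : Int) by omega,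
        if_pos rfl, List.drop_length, pvChunks]
    · have hlt : l < arr.length := lt_of_le_of_ne hl hle
      have hk1 : k.toNat - 1 + 1 = k.toNat := by omega
      rw [pvSolLoop]
      rw [if_neg (show ¬((l : Int) = min ((l : Int) + k) (arr.length : Int)) by omega)]
      -- the appended chunk is (arr.drop l).take k.toNat
      have htake : ∀ m : Nat, (arr.drop l).take (min k.toNat (arr.length - l)) = (arr.drop l).take k.toNat := by
        intro m
        by_cases h : k.toNat ≤ arr.length - l
        · rw [min_eq_left h]
        · rw [min_eq_right (by omega),
            List.take_of_length_le (by simp [List.length_drop]),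
            List.take_of_length_le (by simp [List.length_drop]; omega)]
      have hslice : PySem.List.slice arr (some (l : Int))
          (some (min ((arr.length : Int)) (min ((l : Int) + k) (arr.length : Int))))
          = (arr.drop l).take k.toNat := by
        rw [show min ((arr.length : Int)) (min ((l : Int) + k) (arr.length : Int))
              = min ((l : Int) + k) (arr.length : Int) by omega]
        rw [PySem.List.slice_toNat arr (a := ((l : Nat) : Int))
              (b := min ((l : Int) + k) ((arr.length : Nat) : Int)) (by omega) (by omega)]
        rw [show ((l : Int)).toNat = l by omega]
        rw [show (min ((l : Int) + k) (arr.length : Int)).toNat - l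
              = min k.toNat (arr.length - l) by omega]
        exact htake 0
      -- the recursive call
      have hcast : (((min (l + k.toNat) arr.length : Nat)) : Int)
          = min ((l : Int) + k) (arr.length : Int) := by push_cast; omega
      have hrec : pvSolLoop arr k f (min ((l : Int) + k) (arr.length : Int))
            (min (min ((l : Int) + k) (arr.length : Int) + k) (arr.length : Int))
          = pvChunks (k.toNat - 1) (arr.drop (min (l + k.toNat) arr.length)) := by
        rw [← hcast,
          show min ((((min (l + k.toNat) arr.length : Nat)) : Int) + k) (arr.length : Int)
            = min ((((min (l + k.toNat) arr.length : Nat)) : Int) + k) (arr.length : Int) from rfl]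
        exact ihf (min (l + k.toNat) arr.length) (by omega) (by omega)
      rw [hrec]
      have hdrop2 : arr.drop (min (l + k.toNat) arr.length) = (arr.drop l).drop k.toNat := by
        rw [List.drop_drop]
        by_cases h : l + k.toNat ≤ arr.length
        · rw [min_eq_left h, Nat.add_comm]
        · rw [min_eq_right (by omega),
            List.drop_eq_nil_of_le (le_refl _),
            List.drop_eq_nil_of_le (by omega)]
      rw [hdrop2]
      -- fold the RHS chunks
      cases hd : arr.drop l with
      | nil =>
        exfalso
        have := congrArg List.length hd
        simp [List.length_drop] at this
        omega
      | cons w ws =>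
        rw [pvChunks, hk1, ← hd, hslice]

theorem pvSolLoop_top (k : Int) (hk : 1 ≤ k) (arr : List Int) (hne : arr ≠ []) :
    pvSolLoop arr k (arr.length + 2) 0 k = pvChunks (k.toNat - 1) arr := by
  have hk1 : k.toNat - 1 + 1 = k.toNat := by omega
  have hlen1 : 0 < arr.length := List.length_pos_iff.mpr hne
  rw [show arr.length + 2 = (arr.length + 1) + 1 from rfl, pvSolLoop,
    if_neg (show ¬((0 : Int) = k) by omega)]
  have hc1 : ((min k.toNat arr.length : Nat) : Int) = min ((0 : Int) + k) (arr.length : Int) := by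
    push_cast; omega
  have hc2 : min (k + k) ((arr.length : Nat) : Int)
      = min (((min k.toNat arr.length : Nat) : Int) + k) ((arr.length : Nat) : Int) := by
    push_cast; omega
  rw [← hc1, hc2, pvSolLoop_go k hk arr (arr.length + 1) (min k.toNat arr.length)
    (by omega) (by omega)]
  have hhead : PySem.List.slice arr (some 0)
      (some (min ((arr.length : Nat) : Int) k)) = arr.take k.toNat := by
    rw [PySem.List.slice_toNat arr (a := 0)
      (b := min ((arr.length : Nat) : Int) k) (by omega) (by omega)]
    rw [show ((0 : Int)).toNat = 0 from rfl, List.drop_zero, Nat.sub_zero,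
      show (min ((arr.length : Nat) : Int) k).toNat = min arr.length k.toNat by omega]
    by_cases h : k.toNat ≤ arr.length
    · rw [min_eq_right h]
    · rw [min_eq_left (by omega), List.take_of_length_le (le_refl _),
        List.take_of_length_le (by omega)]
  have hdrop : arr.drop (min k.toNat arr.length) = arr.drop k.toNat := by
    by_cases h : k.toNat ≤ arr.length
    · rw [min_eq_left h]
    · rw [min_eq_right (by omega), List.drop_length, List.drop_eq_nil_of_le (by omega)]
  rw [hhead, hdrop]
  cases arr with
  | nil => exact absurd rfl hne
  | cons v rest => rw [pvChunks, hk1]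

theorem pvSolLoop_nil (k : Int) (hk : 1 ≤ k) :
    pvSolLoop ([] : List Int) k 2 0 k = [[]] := by
  rw [pvSolLoop, if_neg (show ¬((0 : Int) = k) by omega)]
  have h1 : min ((0 : Int) + k) ((List.length ([] : List Int)) : Int) = 0 := by simp; omega
  have h2 : min (k + k) ((List.length ([] : List Int)) : Int) = 0 := by simp; omega
  rw [h1, h2, pvSolLoop, if_pos rfl]
  simp [PySem.List.slice]

theorem pvBCount_spec (k : Int) (hk : 1 ≤ k) : ∀ (rest : List Int) (p : Int), 0 ≤ p →
    ∀ (zs os : List Int), zs.length = k.toNat → os.length = k.toNat →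
    (pvBCount k p rest (zs, os)).1.length = k.toNat ∧
    (pvBCount k p rest (zs, os)).2.length = k.toNat ∧
    ∀ c : Nat, c < k.toNat →
      (pvBCount k p rest (zs, os)).1.getD c 0 = zs.getD c 0 + pvCnt0 k (c : Int) p rest ∧
      (pvBCount k p rest (zs, os)).2.getD c 0 = os.getD c 0 + pvCnt1 k (c : Int) p rest := by
  intro rest
  induction rest with
  | nil =>
    intro p hp zs os hzs hos
    exact ⟨hzs, hos, fun c hc => by simp [pvBCount, pvCnt0, pvCnt1]⟩
  | cons v rest ih =>
    intro p hp zs os hzs hos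
    have hc0 : 0 ≤ PySem.Int.mod p k := PySem.Int.mod_nonneg p (by omega)
    have hck : PySem.Int.mod p k < k := PySem.Int.mod_lt p (by omega)
    have hct : (PySem.Int.mod p k).toNat < k.toNat := by omega
    have hpgz : PySem.List.pyGetD zs (PySem.Int.mod p k) 0
        = zs.getD (PySem.Int.mod p k).toNat 0 := by
      rw [PySem.List.pyGetD_eq_getElem zs 0 hc0 (by rw [hzs]; omega),
        List.getD_eq_getElem zs 0 (by omega)]
    have hpgo : PySem.List.pyGetD os (PySem.Int.mod p k) 0
        = os.getD (PySem.Int.mod p k).toNat 0 := by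
      rw [PySem.List.pyGetD_eq_getElem os 0 hc0 (by rw [hos]; omega),
        List.getD_eq_getElem os 0 (by omega)]
    have hgds : ∀ (ys : List Int), ys.length = k.toNat → ∀ (x : Int) (c : Nat), c < k.toNat →
        (ys.set (PySem.Int.mod p k).toNat x).getD c 0
          = if (PySem.Int.mod p k).toNat = c then x else ys.getD c 0 := by
      intro ys hys x c hc
      rw [List.getD_eq_getElem?_getD, List.getElem?_set]
      split_ifs with h1 h2
      · simp
      · omega
      · rw [← List.getD_eq_getElem?_getD]
    simp only [pvBCount]
    by_cases hv : v = 0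
    · rw [if_pos hv,
        PySem.List.pySetD_of_nonneg zs (PySem.List.pyGetD zs (PySem.Int.mod p k) 0 + 1) hc0]
      have ihr := ih (p + 1) (by omega)
        (zs.set (PySem.Int.mod p k).toNat (PySem.List.pyGetD zs (PySem.Int.mod p k) 0 + 1)) os
        (by simp [hzs]) hos
      refine ⟨ihr.1, ihr.2.1, ?_⟩
      intro c hc
      obtain ⟨h1, h2⟩ := ihr.2.2 c hc
      rw [h1, h2, hgds zs hzs _ c hc, hpgz]
      simp only [pvCnt0, pvCnt1, hv, and_true, not_true, and_false, if_false]
      refine ⟨?_, ?_⟩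
      · by_cases hcc : (PySem.Int.mod p k).toNat = c
        · rw [if_pos hcc, if_pos (show PySem.Int.mod p k = (c : Int) by omega), hcc]
          omega
        · rw [if_neg hcc,
            if_neg (show ¬(PySem.Int.mod p k = (c : Int)) from fun h => hcc (by omega))]
          omega
      · omega
    · rw [if_neg hv,
        PySem.List.pySetD_of_nonneg os (PySem.List.pyGetD os (PySem.Int.mod p k) 0 + 1) hc0]
      have ihr := ih (p + 1) (by omega) zs
        (os.set (PySem.Int.mod p k).toNat (PySem.List.pyGetD os (PySem.Int.mod p k) 0 + 1))
        hzs (by simp [hos])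
      refine ⟨ihr.1, ihr.2.1, ?_⟩
      intro c hc
      obtain ⟨h1, h2⟩ := ihr.2.2 c hc
      rw [h1, h2, hgds os hos _ c hc, hpgo]
      simp only [pvCnt0, pvCnt1]
      refine ⟨?_, ?_⟩
      · rw [if_neg (show ¬(PySem.Int.mod p k = (c : Int) ∧ v = 0) from fun h => hv h.2)]
        omega
      · by_cases hcc : (PySem.Int.mod p k).toNat = c
        · rw [if_pos hcc,
            if_pos (show PySem.Int.mod p k = (c : Int) ∧ ¬v = 0 from ⟨by omega, hv⟩),
            hcc]
          omega
        · rw [if_neg hcc,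
            if_neg (show ¬(PySem.Int.mod p k = (c : Int) ∧ ¬v = 0) from
              fun h => hcc (by omega))]
          omega

theorem pvTiwari_eq (k : Int) (hk : 1 ≤ k) (arr : List Int) :
    pvTiwariA (pvSolLoop arr k (arr.length + 2) 0 k) k
      = List.zip (pvBCount k 0 arr (List.replicate k.toNat 0, List.replicate k.toNat 0)).1
                 (pvBCount k 0 arr (List.replicate k.toNat 0, List.replicate k.toNat 0)).2 := by
  have hb := pvBCount_spec k hk arr 0 (le_refl 0) (List.replicate k.toNat 0)
    (List.replicate k.toNat 0) (by simp) (by simp)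
  have hsol : ∀ (c : Nat), c < k.toNat →
      pvColCount (pvSolLoop arr k (arr.length + 2) 0 k) (c : Int)
        = (pvCnt0 k (c : Int) 0 arr, pvCnt1 k (c : Int) 0 arr) := by
    intro c hc
    by_cases hne : arr = []
    · subst hne
      rw [show ([] : List Int).length + 2 = 2 from rfl, pvSolLoop_nil k hk, pvColCount_cons]
      have hg : pvG [] (c : Int) = (0, 0) := by
        unfold pvG
        rw [if_neg (by simp)]
      rw [hg]
      simp [pvColCount, pvCnt0, pvCnt1]
    · rw [pvSolLoop_top k hk arr hne, pvColCount_chunks k (c : Int) hk (by positivity)]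
  apply List.ext_getElem?
  intro idx
  have hlz : ((pvBCount k 0 arr (List.replicate k.toNat 0, List.replicate k.toNat 0)).1.zip
      (pvBCount k 0 arr (List.replicate k.toNat 0, List.replicate k.toNat 0)).2).length
      = k.toNat := by
    rw [List.length_zip, hb.1, hb.2.1, min_self]
  have hlt : (pvTiwariA (pvSolLoop arr k (arr.length + 2) 0 k) k).length = k.toNat := by
    unfold pvTiwariA
    rw [List.length_map, PySem.List.length_pyRange_one]
    omega
  by_cases hidx : idx < k.toNat
  · rw [List.getElem?_eq_getElem (by omega), List.getElem?_eq_getElem (by omega)]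
    congr 1
    rw [List.getElem_zip]
    unfold pvTiwariA
    rw [List.getElem_map]
    rw [PySem.List.getElem_pyRange_one 0 k idx
      (by rw [PySem.List.length_pyRange_one]; omega)]
    rw [zero_add, hsol idx hidx]
    obtain ⟨e1, e2⟩ := hb.2.2 idx hidx
    rw [List.getD_eq_getElem
        ((pvBCount k 0 arr (List.replicate k.toNat 0, List.replicate k.toNat 0)).1) 0
        (by rw [hb.1]; omega),
      List.getD_replicate 0 hidx] at e1
    rw [List.getD_eq_getElem
        ((pvBCount k 0 arr (List.replicate k.toNat 0, List.replicate k.toNat 0)).2) 0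
        (by rw [hb.2.1]; omega),
      List.getD_replicate 0 hidx] at e2
    rw [Prod.mk.injEq]
    exact ⟨by omega, by omega⟩
  · have h1 : (pvTiwariA (pvSolLoop arr k (arr.length + 2) 0 k) k)[idx]? = none :=
      List.getElem?_eq_none (by omega)
    have h2 : ((pvBCount k 0 arr (List.replicate k.toNat 0, List.replicate k.toNat 0)).1.zip
        (pvBCount k 0 arr (List.replicate k.toNat 0, List.replicate k.toNat 0)).2)[idx]? = none :=
      List.getElem?_eq_none (by omega)
    rw [h1, h2]

theorem min_flips_to_xorgon_spec : Claim_equal_min_flips_to_xorgon := by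
  intro n k arr _ hPre
  unfold Spec_min_flips_to_xorgon min_flips_to_xorgon min_flips_to_xorgon_alt
  rcases hPre with hk | ⟨hk0, harr⟩
  · rw [pvTiwari_eq k hk arr]; rfl
  · subst hk0; subst harr; rfl
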